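-- pv_equiv track=rewrite | github.com/bbakercello/python_algos | test.py | bag_counter
-- ===== SOURCE A (Python) =====
-- from typing import Counter, List
--
-- def bag_counter(numbers: List) -> int:
--     '''
--     This function finds the largest sum of pairs with equal sum.
--
--     Args:
--         numbers: A list of integers to find pairs from
--
--     Returns:
--         int: The maximum number of pairs that can be formed with equal sums
--     '''
--     bag = Counter(numbers)
--
--     min_sum = 2 # smallest possible pair sum (1+1)
--     max_sum = 2 * max(numbers)
--     best = 0
--
--     # For each sum
--     for s in range(min_sum, max_sum + 1):
--         temp_bag = bag.copy()
--         pairs = 0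
--
--        # For each key value in temp_bag
--         for x, count in temp_bag.items():
--             y = s - x
--             if y not in temp_bag:
--                 continue # can't form this pair
--             if x == y:
--                 pairs += count // 2 # how many pairs of this number are at this key
--                 temp_bag[x] = 0
--             else:
--                 available = min(temp_bag[x], temp_bag[y])
--                 pairs += available
--                 temp_bag[x] = 0
--                 temp_bag[y] = 0
--         best = max(best, pairs)
--     return best
-- ===== SOURCE B (Python) =====
-- def bag_counter(numbers):
--     '''Largest number of pairs formable with one common pair sum.
--
--     Groups min(count[x], count[y]) by the sum x+y over distinct key pairs
--     (plus count[x]//2 for the doubled key), then takes the best sum >= 2,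
--     instead of scanning every candidate sum in range(2, 2*max+1).
--     '''
--     counts = {}
--     for n in numbers:
--         counts[n] = counts.get(n, 0) + 1
--     keys = list(counts)
--     by_sum = {}
--     for i, x in enumerate(keys):
--         by_sum[2 * x] = by_sum.get(2 * x, 0) + counts[x] // 2
--         for y in keys[i + 1:]:          # the tail of keys after x
--             s = x + y
--             by_sum[s] = by_sum.get(s, 0) + min(counts[x], counts[y])
--     best = 0
--     for s, p in by_sum.items():
--         if s >= 2 and p > best:
--             best = p
--     return best
-- ===== Notes on version B (the rewrite author's own statement) =====
-- stated objective: faster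
-- what changed: Instead of scanning every candidate sum s in range(2, 2*max+1) and re-matching the whole counter for each s, B groups min(count[x],count[y]) (and count[x]//2 on the diagonal) by the sum x+y over distinct key pairs once, then takes the best bucket with sum >= 2.
import Mathlib
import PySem

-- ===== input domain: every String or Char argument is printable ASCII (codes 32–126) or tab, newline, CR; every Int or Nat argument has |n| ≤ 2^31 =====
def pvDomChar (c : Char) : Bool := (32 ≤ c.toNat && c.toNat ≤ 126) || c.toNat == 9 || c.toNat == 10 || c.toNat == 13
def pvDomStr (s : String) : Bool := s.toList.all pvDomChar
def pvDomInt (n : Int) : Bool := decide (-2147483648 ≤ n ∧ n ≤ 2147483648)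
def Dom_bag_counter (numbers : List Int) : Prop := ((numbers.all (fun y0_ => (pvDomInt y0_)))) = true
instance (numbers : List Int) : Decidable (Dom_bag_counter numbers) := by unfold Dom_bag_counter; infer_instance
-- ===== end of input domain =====

-- B groups pair counts by their sum over distinct counter keys (O(k^2)) instead of
-- re-matching the whole counter for every candidate sum in range(2, 2*max+1).

-- ===== PORT A =====
-- Body of A's inner loop 'for x, count in temp_bag.items()': the state is
-- (temp_bag, pairs).  items() reads values live while they are zeroed, and inserts
-- never add keys (x and y are existing keys), so the loop is a fold over the
-- (fixed) key list reading the current value of temp at each step.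
def aStep (s : Int) (st : PySem.Dict Int Int × Int) (x : Int) : PySem.Dict Int Int × Int :=
  let t := st.1
  let count := t.getD x 0
  let y := s - x
  if t.contains y = false then st                        -- 'if y not in temp_bag: continue'
  else if x = y then (t.insert x 0, st.2 + PySem.Int.floordiv count 2)
  else
    let available := min (t.getD x 0) (t.getD y 0)
    ((t.insert x 0).insert y 0, st.2 + available)

def bag_counter (numbers : List Int) : Int :=
  match PySem.List.max? numbers id with
  | none => 0  -- Python raises ValueError here (max of empty); excluded by Pre_
  | some mx =>
    let bag := PySem.Dict.counter numbers
    (PySem.List.pyRange 2 (2 * mx + 1) 1).foldl (fun best s =>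
      let res := bag.keys.foldl (aStep s) (bag, 0)      -- temp_bag = bag.copy(); pairs = 0
      max best res.2) 0

-- ===== PORT B =====
-- 'for i, x in enumerate(keys): … for y in keys[i+1:]' is recursion on the key list:
-- x is the head, keys[i+1:] is the tail 'rest'.
def bsumLoop (c : PySem.Dict Int Int) : List Int → PySem.Dict Int Int → PySem.Dict Int Int
  | [], d => d
  | x :: rest, d =>
      let d1 := d.insert (2 * x) (d.getD (2 * x) 0 + PySem.Int.floordiv (c.getD x 0) 2)
      let d2 := rest.foldl (fun d y =>
        d.insert (x + y) (d.getD (x + y) 0 + min (c.getD x 0) (c.getD y 0))) d1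
      bsumLoop c rest d2

def bag_counter_alt (numbers : List Int) : Int :=
  let counts := numbers.foldl (fun d n => d.insert n (d.getD n 0 + 1)) PySem.Dict.empty
  let bySum := bsumLoop counts counts.keys PySem.Dict.empty
  bySum.items.foldl (fun best sp => if 2 ≤ sp.1 ∧ best < sp.2 then sp.2 else best) 0

-- ===== PRECONDITION & SPEC =====
-- A raises ValueError on the empty list (max of empty sequence); that input is excluded.
def Pre_bag_counter (numbers : List Int) : Prop := numbers ≠ []
instance (numbers : List Int) : Decidable (Pre_bag_counter numbers) := by
  unfold Pre_bag_counter; infer_instance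

def pvWitness_bag_counter : List Int := [1, 2, 1]

def Spec_bag_counter (numbers : List Int) (out : Int) : Prop := out = bag_counter_alt numbers
instance (numbers : List Int) (out : Int) : Decidable (Spec_bag_counter numbers out) := by
  unfold Spec_bag_counter; infer_instance

-- ===== CLAIM (what is proved, stated in full; the proofs are below) =====
def Claim_equal_bag_counter : Prop := ∀ (numbers : List Int), Dom_bag_counter numbers →
  Pre_bag_counter numbers → Spec_bag_counter numbers (bag_counter numbers)

-- ===== LEMMAS AND PROOFS =====

-- Multiplicity of z in numbers, as an Int (the value Counter(numbers)[z]).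
def pvCnt (numbers : List Int) (z : Int) : Int := (numbers.count z : Int)

-- The number of pairs with sum s formable from a key list l with multiplicities c,
-- each key matched with the first later partner: the common value of A's per-sum
-- matching pass and B's per-pair bucket at s.
def pvP (c : Int → Int) (s : Int) : List Int → Int
  | [] => 0
  | x :: r => (if x = s - x then PySem.Int.floordiv (c x) 2
      else if (s - x) ∈ r then min (c x) (c (s - x)) else 0) + pvP c s r

lemma pvCnt_eq_zero (numbers : List Int) (z : Int) (h : z ∉ PySem.Set.ofList numbers) :
    pvCnt numbers z = 0 := by
  rw [PySem.Set.mem_ofList] at h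
  simp [pvCnt, List.count_eq_zero.mpr h]

lemma pvP_congr (c1 c2 : Int → Int) (h : ∀ z, c1 z = c2 z) (s : Int) (l : List Int) :
    pvP c1 s l = pvP c2 s l := by
  induction l with
  | nil => rfl
  | cons x r ih => simp [pvP, h, ih]

-- The two membership conditions before/after moving x from 'rest' to the processed prefix.
lemma pvCondCongr (ks pref : List Int) (s x z : Int) (hzx : z ≠ x) (hzsx : s - z ≠ x) :
    ((s - z) ∈ ks ∧ (z ∈ pref ++ [x] ∨ (s - z) ∈ pref ++ [x])) ↔
      ((s - z) ∈ ks ∧ (z ∈ pref ∨ (s - z) ∈ pref)) := by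
  simp [List.mem_append, hzx, hzsx]

-- A's inner matching pass over the remaining keys, given the already-processed prefix.
lemma pvInnerA (numbers : List Int) (s : Int) :
    ∀ (rest pref : List Int) (t : PySem.Dict Int Int) (p : Int),
    PySem.Set.ofList numbers = pref ++ rest →
    (∀ z, t.contains z = true ↔ z ∈ PySem.Set.ofList numbers) →
    (∀ z, t.getD z 0 = if (s - z) ∈ PySem.Set.ofList numbers ∧ (z ∈ pref ∨ (s - z) ∈ pref)
        then 0 else pvCnt numbers z) →
    (rest.foldl (aStep s) (t, p)).2 = p + pvP (pvCnt numbers) s rest := by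
  intro rest
  induction rest with
  | nil => intro pref t p _ _ _; simp [pvP]
  | cons x r ih =>
    intro pref t p hks hc hg
    have hnd : (pref ++ x :: r).Nodup := hks ▸ PySem.Set.nodup_ofList numbers
    rw [List.nodup_append] at hnd
    obtain ⟨hndp, hndxr, hdisj⟩ := hnd
    rw [List.nodup_cons] at hndxr
    have hxr : x ∉ r := hndxr.1
    have hxpref : x ∉ pref := fun h => hdisj x h x (by simp) rfl
    have hxks : x ∈ PySem.Set.ofList numbers := by rw [hks]; simp
    have hks' : PySem.Set.ofList numbers = (pref ++ [x]) ++ r := by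
      rw [hks]; simp
    simp only [List.foldl_cons]
    by_cases hy : (s - x) ∈ PySem.Set.ofList numbers
    · have hcy : t.contains (s - x) = true := (hc _).mpr hy
      by_cases hxy : x = s - x
      · -- diagonal key: pairs += count // 2
        have hstep : aStep s (t, p) x
            = (t.insert x 0, p + PySem.Int.floordiv (t.getD x 0) 2) := by
          simp only [aStep]
          rw [hcy, if_neg (by simp), if_pos hxy]
        have hgx : t.getD x 0 = pvCnt numbers x := by
          rw [hg x, if_neg ?_]
          rintro ⟨-, h | h⟩
          · exact hxpref h
          · exact hxpref (by rwa [← hxy] at h)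
        have hc2 : ∀ z, (t.insert x 0).contains z = true ↔
            z ∈ PySem.Set.ofList numbers := by
          intro z
          rw [PySem.Dict.contains_insert]
          simp only [Bool.or_eq_true, beq_iff_eq]
          constructor
          · rintro (rfl | h)
            · exact hxks
            · exact (hc z).mp h
          · exact fun h => Or.inr ((hc z).mpr h)
        have hg2 : ∀ z, (t.insert x 0).getD z 0 =
            if (s - z) ∈ PySem.Set.ofList numbers ∧
              (z ∈ pref ++ [x] ∨ (s - z) ∈ pref ++ [x]) then 0 else pvCnt numbers z := by
          intro z
          rw [PySem.Dict.getD_insert]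
          by_cases hzx : z = x
          · subst hzx
            rw [if_pos rfl, if_pos ⟨by rwa [← hxy], Or.inl (by simp)⟩]
          · have hzsx : s - z ≠ x := fun h => hzx (by omega)
            rw [if_neg hzx, hg z]
            exact if_congr (pvCondCongr _ _ _ _ _ hzx hzsx).symm rfl rfl
        rw [hstep, ih (pref ++ [x]) _ _ hks' hc2 hg2]
        simp only [pvP, if_pos hxy, hgx]
        omega
      · -- distinct pair x, s-x
        have hstep : aStep s (t, p) x
            = ((t.insert x 0).insert (s - x) 0, p + min (t.getD x 0) (t.getD (s - x) 0)) := by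
          simp only [aStep]
          rw [hcy, if_neg (by simp), if_neg hxy]
        have hc2 : ∀ z, ((t.insert x 0).insert (s - x) 0).contains z = true ↔
            z ∈ PySem.Set.ofList numbers := by
          intro z
          rw [PySem.Dict.contains_insert, PySem.Dict.contains_insert]
          simp only [Bool.or_eq_true, beq_iff_eq]
          constructor
          · rintro (rfl | rfl | h)
            · exact hy
            · exact hxks
            · exact (hc z).mp h
          · exact fun h => Or.inr (Or.inr ((hc z).mpr h))
        by_cases hyp : (s - x) ∈ pref
        · -- partner already zeroed: contributes 0
          have hgx : t.getD x 0 = 0 := by rw [hg x, if_pos ⟨hy, Or.inr hyp⟩]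
          have hgy : t.getD (s - x) 0 = 0 := by
            rw [hg (s - x),
              if_pos ⟨by rw [show s - (s - x) = x by omega]; exact hxks, Or.inl hyp⟩]
          have h2 : (s - x) ∉ r := fun h => hdisj (s - x) hyp (s - x) (by simp [h]) rfl
          have hg2 : ∀ z, ((t.insert x 0).insert (s - x) 0).getD z 0 =
              if (s - z) ∈ PySem.Set.ofList numbers ∧
                (z ∈ pref ++ [x] ∨ (s - z) ∈ pref ++ [x]) then 0 else pvCnt numbers z := by
            intro z
            rw [PySem.Dict.getD_insert, PySem.Dict.getD_insert]
            by_cases hz1 : z = s - x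
            · rw [if_pos hz1,
                if_pos ⟨by rw [hz1, show s - (s - x) = x by omega]; exact hxks,
                  Or.inl (by rw [hz1]; exact List.mem_append.mpr (Or.inl hyp))⟩]
            · rw [if_neg hz1]
              by_cases hz2 : z = x
              · rw [if_pos hz2,
                  if_pos ⟨by rw [hz2]; exact hy, Or.inl (by simp [hz2])⟩]
              · have hzsx : s - z ≠ x := fun h => hz1 (by omega)
                rw [if_neg hz2, hg z]
                exact if_congr (pvCondCongr _ _ _ _ _ hz2 hzsx).symm rfl rfl
          rw [hstep, hgx, hgy, ih (pref ++ [x]) _ _ hks' hc2 hg2]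
          simp only [pvP, if_neg hxy, if_neg h2]
          simp
        · -- partner still ahead in r: contributes min of the counts
          have hyr : (s - x) ∈ r := by
            have hmem : (s - x) ∈ pref ++ x :: r := by rw [← hks]; exact hy
            rcases List.mem_append.mp hmem with h | h
            · exact absurd h hyp
            · rcases List.mem_cons.mp h with h | h
              · exact absurd h.symm hxy
              · exact h
          have hgx : t.getD x 0 = pvCnt numbers x := by
            rw [hg x, if_neg ?_]
            rintro ⟨-, h | h⟩
            · exact hxpref h
            · exact hyp h
          have hgy : t.getD (s - x) 0 = pvCnt numbers (s - x) := by
            rw [hg (s - x), if_neg ?_]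
            rintro ⟨-, h | h⟩
            · exact hyp h
            · exact hxpref (by rwa [show s - (s - x) = x by omega] at h)
          have hg2 : ∀ z, ((t.insert x 0).insert (s - x) 0).getD z 0 =
              if (s - z) ∈ PySem.Set.ofList numbers ∧
                (z ∈ pref ++ [x] ∨ (s - z) ∈ pref ++ [x]) then 0 else pvCnt numbers z := by
            intro z
            rw [PySem.Dict.getD_insert, PySem.Dict.getD_insert]
            by_cases hz1 : z = s - x
            · rw [if_pos hz1,
                if_pos ⟨by rw [hz1, show s - (s - x) = x by omega]; exact hxks,
                  Or.inr (by rw [hz1, show s - (s - x) = x by omega]; simp)⟩]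
            · rw [if_neg hz1]
              by_cases hz2 : z = x
              · rw [if_pos hz2,
                  if_pos ⟨by rw [hz2]; exact hy, Or.inl (by simp [hz2])⟩]
              · have hzsx : s - z ≠ x := fun h => hz1 (by omega)
                rw [if_neg hz2, hg z]
                exact if_congr (pvCondCongr _ _ _ _ _ hz2 hzsx).symm rfl rfl
          rw [hstep, hgx, hgy, ih (pref ++ [x]) _ _ hks' hc2 hg2]
          simp only [pvP, if_neg hxy, if_pos hyr]
          omega
    · -- partner key absent: continue
      have hcy : t.contains (s - x) = false := by
        cases hcc : t.contains (s - x)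
        · rfl
        · exact absurd ((hc _).mp hcc) hy
      have hstep : aStep s (t, p) x = (t, p) := by
        simp only [aStep]
        rw [hcy, if_pos rfl]
      have hg2 : ∀ z, t.getD z 0 =
          if (s - z) ∈ PySem.Set.ofList numbers ∧
            (z ∈ pref ++ [x] ∨ (s - z) ∈ pref ++ [x]) then 0 else pvCnt numbers z := by
        intro z
        by_cases hz2 : z = s - x
        · have h0 : pvCnt numbers z = 0 := by
            rw [hz2]; exact pvCnt_eq_zero numbers _ hy
          rw [hg z, h0]
          split_ifs <;> rfl
        · by_cases hzx : z = x
          · have hnc : ¬ ((s - z) ∈ PySem.Set.ofList numbers ∧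
                (z ∈ pref ++ [x] ∨ (s - z) ∈ pref ++ [x])) := by
              rintro ⟨h1, -⟩
              rw [hzx] at h1
              exact hy h1
            have hnc0 : ¬ ((s - z) ∈ PySem.Set.ofList numbers ∧
                (z ∈ pref ∨ (s - z) ∈ pref)) := by
              rintro ⟨h1, -⟩
              rw [hzx] at h1
              exact hy h1
            rw [hg z, if_neg hnc0, if_neg hnc]
          · have hzsx : s - z ≠ x := fun h => hz2 (by omega)
            rw [hg z]
            exact if_congr (pvCondCongr _ _ _ _ _ hzx hzsx).symm rfl rfl
      rw [hstep, ih (pref ++ [x]) t p hks' hc hg2]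
      have h1 : ¬ (x = s - x) := fun h => hy (h ▸ hxks)
      have h2 : (s - x) ∉ r := fun h => hy (by rw [hks]; simp [h])
      simp only [pvP, if_neg h1, if_neg h2]
      omega

lemma pvA_pairs (numbers : List Int) (s : Int) :
    ((PySem.Dict.counter numbers).keys.foldl (aStep s) (PySem.Dict.counter numbers, 0)).2
      = pvP (pvCnt numbers) s (PySem.Set.ofList numbers) := by
  rw [PySem.Dict.keys_counter]
  rw [pvInnerA numbers s (PySem.Set.ofList numbers) [] (PySem.Dict.counter numbers) 0
    (by simp) ?_ ?_]
  · simp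
  · intro z
    rw [PySem.Dict.contains_counter]
    simp [PySem.Set.mem_ofList]
  · intro z
    simp [PySem.Dict.getD_counter, pvCnt]

-- B's inner bucket loop.
lemma pvInnerB (c : PySem.Dict Int Int) (x s' : Int) :
    ∀ (ys : List Int) (d : PySem.Dict Int Int), ys.Nodup →
    (ys.foldl (fun d y =>
        d.insert (x + y) (d.getD (x + y) 0 + min (c.getD x 0) (c.getD y 0))) d).getD s' 0
      = d.getD s' 0 + (if (s' - x) ∈ ys then min (c.getD x 0) (c.getD (s' - x) 0) else 0) := by
  intro ys
  induction ys with
  | nil => intro d _; simp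
  | cons y t ih =>
      intro d hnd
      rw [List.nodup_cons] at hnd
      simp only [List.foldl_cons]
      rw [ih _ hnd.2, PySem.Dict.getD_insert]
      by_cases hz : s' = x + y
      · subst hz
        have hy : x + y - x = y := by omega
        have hnt : x + y - x ∉ t := by rw [hy]; exact hnd.1
        rw [if_pos rfl, if_neg hnt, if_pos (by simp [hy]), hy]
        omega
      · have hy : s' - x ≠ y := by omega
        rw [if_neg hz]
        simp only [List.mem_cons, hy, false_or]

lemma pvBsum_getD (c : PySem.Dict Int Int) (s' : Int) :
    ∀ (l : List Int) (d : PySem.Dict Int Int), l.Nodup →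
    (bsumLoop c l d).getD s' 0 = d.getD s' 0 + pvP (fun z => c.getD z 0) s' l := by
  intro l
  induction l with
  | nil => intro d _; simp [bsumLoop, pvP]
  | cons x r ih =>
      intro d hnd
      rw [List.nodup_cons] at hnd
      simp only [bsumLoop]
      rw [ih _ hnd.2, pvInnerB c x s' r _ hnd.2, PySem.Dict.getD_insert]
      simp only [pvP]
      by_cases h1 : x = s' - x
      · have h2 : s' = 2 * x := by omega
        subst h2
        have h3 : 2 * x - x ∉ r := by rw [show 2 * x - x = x by omega]; exact hnd.1
        rw [if_pos (show (2 * x : Int) = 2 * x from rfl), if_neg h3,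
          if_pos (show x = 2 * x - x by omega)]
        omega
      · have h3 : s' ≠ 2 * x := by omega
        simp only [if_neg h3, if_neg h1]
        split_ifs <;> omega

lemma pvInnerB_keys (c : PySem.Dict Int Int) (x : Int) (ys : List Int)
    (d : PySem.Dict Int Int) (k : Int) :
    k ∈ (ys.foldl (fun d y =>
        d.insert (x + y) (d.getD (x + y) 0 + min (c.getD x 0) (c.getD y 0))) d).keys ↔
      k ∈ d.keys ∨ k ∈ ys.map (fun y => x + y) := by
  rw [PySem.Dict.keys_foldl_insert_key ys (fun y => x + y)
    (fun d y => d.getD (x + y) 0 + min (c.getD x 0) (c.getD y 0)) d]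
  exact PySem.Set.mem_update _ _ _

lemma pvBsum_keys_mono (c : PySem.Dict Int Int) :
    ∀ (l : List Int) (d : PySem.Dict Int Int) (k : Int),
    k ∈ d.keys → k ∈ (bsumLoop c l d).keys := by
  intro l
  induction l with
  | nil => intro d k h; exact h
  | cons x r ih =>
      intro d k h
      simp only [bsumLoop]
      apply ih
      rw [pvInnerB_keys]
      exact Or.inl ((PySem.Dict.mem_keys_insert _ _ _ _).mpr (Or.inr h))

lemma pvBsum_mem_of_P_ne (c : PySem.Dict Int Int) (s' : Int) :
    ∀ (l : List Int) (d : PySem.Dict Int Int),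
    pvP (fun z => c.getD z 0) s' l ≠ 0 → s' ∈ (bsumLoop c l d).keys := by
  intro l
  induction l with
  | nil => intro d h; simp [pvP] at h
  | cons x r ih =>
      intro d h
      simp only [bsumLoop]
      by_cases hr : pvP (fun z => c.getD z 0) s' r ≠ 0
      · exact ih _ hr
      · simp only [ne_eq, not_not] at hr
        simp only [pvP, hr, add_zero] at h
        apply pvBsum_keys_mono
        rw [pvInnerB_keys]
        by_cases h1 : x = s' - x
        · left
          rw [if_pos h1] at h
          exact (PySem.Dict.mem_keys_insert _ _ _ _).mpr (Or.inl (by omega))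
        · right
          rw [if_neg h1] at h
          by_cases h2 : (s' - x) ∈ r
          · exact List.mem_map.mpr ⟨s' - x, h2, by omega⟩
          · rw [if_neg h2] at h; exact absurd rfl h

lemma pvBsum_keys_le (c : PySem.Dict Int Int) (m : Int) :
    ∀ (l : List Int) (d : PySem.Dict Int Int), (∀ x ∈ l, x ≤ m) →
    (∀ k ∈ d.keys, k ≤ 2 * m) → ∀ k ∈ (bsumLoop c l d).keys, k ≤ 2 * m := by
  intro l
  induction l with
  | nil => intro d _ h2 k hk; exact h2 k hk
  | cons x r ih =>
      intro d h1 h2 k hk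
      simp only [bsumLoop] at hk
      refine ih _ (fun y hy => h1 y (by simp [hy])) ?_ k hk
      intro j hj
      rw [pvInnerB_keys] at hj
      rcases hj with hj | hj
      · rcases (PySem.Dict.mem_keys_insert _ _ _ _).mp hj with rfl | hj
        · have := h1 x (by simp); omega
        · exact h2 j hj
      · obtain ⟨y, hy, rfl⟩ := List.mem_map.mp hj
        have hx := h1 x (by simp)
        have := h1 y (by simp [hy])
        omega

lemma pvBsum_nodup (c : PySem.Dict Int Int) :
    ∀ (l : List Int) (d : PySem.Dict Int Int), d.keys.Nodup → (bsumLoop c l d).keys.Nodup := by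
  intro l
  induction l with
  | nil => intro d h; exact h
  | cons x r ih =>
      intro d h
      simp only [bsumLoop]
      exact ih _ (PySem.Dict.nodup_keys_foldl_insert_key r (fun y => x + y)
        (fun d y => d.getD (x + y) 0 + min (c.getD x 0) (c.getD y 0)) _
        (PySem.Dict.nodup_keys_insert _ _ _ h))

-- max-fold toolkit
lemma pvMax_le (f : Int → Int) :
    ∀ (l : List Int) (b q : Int), b ≤ q → (∀ s ∈ l, f s ≤ q) →
    l.foldl (fun b s => max b (f s)) b ≤ q := by
  intro l
  induction l with
  | nil => intro b q hb _; simpa using hb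
  | cons x r ih =>
      intro b q hb hl
      simp only [List.foldl_cons]
      exact ih _ _ (max_le hb (hl x (by simp))) (fun s hs => hl s (by simp [hs]))

lemma pvMax_ge (f : Int → Int) (l : List Int) (b : Int) :
    b ≤ l.foldl (fun b s => max b (f s)) b ∧
      ∀ s ∈ l, f s ≤ l.foldl (fun b s => max b (f s)) b := by
  have h := PySem.List.le_foldl_max (l.map f) b
  rw [List.foldl_map] at h
  exact ⟨h.1, fun s hs => h.2 (f s) (List.mem_map_of_mem hs)⟩

lemma pvMax?_some (numbers : List Int) (h : numbers ≠ []) :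
    ∃ mx, PySem.List.max? numbers id = some mx := by
  cases numbers with
  | nil => exact absurd rfl h
  | cons x r =>
      rw [PySem.List.max?]
      simp only [List.foldl_cons]
      induction r generalizing x with
      | nil => exact ⟨x, rfl⟩
      | cons y t ih =>
          simp only [List.foldl_cons]
          split <;> exact ih _ (by simp)

-- ===== VERDICT (by name: the statement is the Claim_ definition above) =====
theorem bag_counter_spec : Claim_equal_bag_counter := by
  unfold Claim_equal_bag_counter
  intro numbers _ hpre
  unfold Spec_bag_counter
  obtain ⟨mx, hm⟩ := pvMax?_some numbers hpre
  have hA : bag_counter numbers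
      = (PySem.List.pyRange 2 (2 * mx + 1) 1).foldl
          (fun b s => max b (pvP (pvCnt numbers) s (PySem.Set.ofList numbers))) 0 := by
    unfold bag_counter
    rw [hm]
    apply PySem.List.foldl_congr_mem
    intro acc y _
    exact congrArg (max acc) (pvA_pairs numbers y)
  set cdict : PySem.Dict Int Int :=
    numbers.foldl (fun d n => d.insert n (d.getD n 0 + 1)) PySem.Dict.empty with hcdict
  have hcget : ∀ z, cdict.getD z 0 = pvCnt numbers z := by
    intro z
    rw [hcdict, PySem.Dict.getD_foldl_insert_add_one numbers PySem.Dict.empty z]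
    simp [pvCnt]
  have hckeys : cdict.keys = PySem.Set.ofList numbers := by
    rw [hcdict,
      PySem.Dict.keys_foldl_insert numbers (fun d x => d.getD x 0 + 1) PySem.Dict.empty,
      PySem.Dict.keys_empty, PySem.Set.update_nil_left]
  have hknodup : (PySem.Set.ofList numbers).Nodup := PySem.Set.nodup_ofList numbers
  set bySum := bsumLoop cdict cdict.keys PySem.Dict.empty with hbs
  have hbget : ∀ k, bySum.getD k 0 = pvP (pvCnt numbers) k (PySem.Set.ofList numbers) := by
    intro k
    rw [hbs, hckeys, pvBsum_getD cdict k _ _ hknodup, PySem.Dict.getD_empty,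
      pvP_congr (fun z => cdict.getD z 0) (pvCnt numbers) hcget k]
    simp
  have hbnodup : bySum.keys.Nodup := by
    rw [hbs]
    exact pvBsum_nodup _ _ _ (by rw [PySem.Dict.keys_empty]; exact List.nodup_nil)
  have hbound : ∀ k ∈ bySum.keys, k ≤ 2 * mx := by
    rw [hbs, hckeys]
    exact pvBsum_keys_le cdict mx _ _
      (fun x hx => PySem.List.max?_isMax hm x ((PySem.Set.mem_ofList _ _).mp hx))
      (by simp [PySem.Dict.keys_empty])
  have hzero : ∀ k, k ∉ bySum.keys →
      pvP (pvCnt numbers) k (PySem.Set.ofList numbers) = 0 := by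
    intro k hk
    by_contra hne
    apply hk
    rw [hbs, hckeys]
    apply pvBsum_mem_of_P_ne
    rw [pvP_congr (fun z => cdict.getD z 0) (pvCnt numbers) hcget k]
    exact hne
  have hB : bag_counter_alt numbers
      = (bySum.keys.filter (fun k => decide (2 ≤ k))).foldl
          (fun b s => max b (pvP (pvCnt numbers) s (PySem.Set.ofList numbers))) 0 := by
    show bySum.items.foldl (fun best sp => if 2 ≤ sp.1 ∧ best < sp.2 then sp.2 else best) 0 = _
    rw [PySem.Dict.items_eq_map_keys bySum hbnodup 0, List.foldl_map, List.foldl_filter]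
    apply PySem.List.foldl_congr_mem
    intro acc k _
    rw [hbget k, max_def]
    simp only [decide_eq_true_eq]
    split_ifs <;> omega
  rw [hA, hB]
  apply le_antisymm
  · apply pvMax_le
    · exact (pvMax_ge _ _ _).1
    · intro y hy
      by_cases hmem : y ∈ bySum.keys.filter (fun k => decide (2 ≤ k))
      · exact (pvMax_ge _ _ _).2 y hmem
      · have h2 : (2:Int) ≤ y := (PySem.List.mem_pyRange_one.mp hy).1
        have hnk : y ∉ bySum.keys := fun hk =>
          hmem (List.mem_filter.mpr ⟨hk, by simpa using h2⟩)
        rw [hzero y hnk]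
        exact (pvMax_ge _ _ _).1
  · apply pvMax_le
    · exact (pvMax_ge _ _ _).1
    · intro y hy
      have hyk := List.mem_filter.mp hy
      have h2 : (2:Int) ≤ y := by simpa using hyk.2
      have hle := hbound y hyk.1
      exact (pvMax_ge _ _ _).2 y (PySem.List.mem_pyRange_one.mpr ⟨h2, by omega⟩)
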